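-- pv_equiv track=rewrite | github.com/MiguelSouzaDosReis/restaurant-orders | src/analyze_log.py | joao_request
-- ===== SOURCE A (Python) =====
-- def joao_request(data):
--     foods_in_general = set()
--     foods_of_joao = set()
--     for rows in data:
--         foods_in_general.add(rows["food"])
--         if rows["name"] == "joao":
--             foods_of_joao.add(rows["food"])
--     return foods_in_general.difference(foods_of_joao)
-- ===== SOURCE B (Python) =====
-- def joao_request(data):
--     names_by_food = {}
--     for rows in data:
--         names_by_food.setdefault(rows["food"], []).append(rows["name"])
--     return {food for food, names in names_by_food.items() if "joao" not in names}
-- ===== Notes on version B (the rewrite author's own statement) =====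
-- stated objective: alternative
-- what changed: Instead of accumulating two sets and taking a set difference, B builds a grouping index food -> list of all customer names that ordered it, then keeps the foods whose name list lacks 'joao' via a membership test per food.
-- outside the precondition, e.g. on joao_request([{'name': 'ana'}]): A raises KeyError, B raises KeyError
import Mathlib
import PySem

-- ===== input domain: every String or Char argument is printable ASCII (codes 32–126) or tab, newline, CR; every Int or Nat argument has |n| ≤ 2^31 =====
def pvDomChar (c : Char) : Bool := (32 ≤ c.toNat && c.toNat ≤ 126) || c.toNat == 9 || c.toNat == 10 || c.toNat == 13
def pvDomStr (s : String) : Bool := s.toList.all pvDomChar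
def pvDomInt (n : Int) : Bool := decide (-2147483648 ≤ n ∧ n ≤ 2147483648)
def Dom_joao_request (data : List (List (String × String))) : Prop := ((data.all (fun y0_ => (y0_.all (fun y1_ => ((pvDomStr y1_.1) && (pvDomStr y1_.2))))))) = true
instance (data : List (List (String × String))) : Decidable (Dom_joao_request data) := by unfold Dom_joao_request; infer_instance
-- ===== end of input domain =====

-- B replaces A's two accumulated sets + set.difference by a grouping index food → list of all
-- customer names that ordered it, finished by keeping the foods whose name list lacks "joao"
-- (alternative decomposition/data structure, same overall cost on these inputs).

-- rows[k] for a row dict; total stand-in for Python's subscript: Pre_ excludes the KeyError case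
def pvRowGet (row : List (String × String)) (k : String) : String :=
  ((PySem.Dict.mk row).get? k).getD ""

-- ===== PORT A =====
def joao_request (data : List (List (String × String))) : List String :=
  let p := data.foldl
    (fun (p : PySem.Set String × PySem.Set String) row =>
      (PySem.Set.add p.1 (pvRowGet row "food"),
       if pvRowGet row "name" == "joao" then PySem.Set.add p.2 (pvRowGet row "food") else p.2))
    (PySem.Set.empty, PySem.Set.empty)
  PySem.Set.diff p.1 p.2

-- ===== PORT B =====
def joao_request_alt (data : List (List (String × String))) : List String :=
  let d := data.foldl
    (fun (d : PySem.Dict String (List String)) row =>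
      d.insert (pvRowGet row "food")
        ((d.getD (pvRowGet row "food") []) ++ [pvRowGet row "name"]))
    PySem.Dict.empty
  PySem.Set.ofList ((d.items.filter (fun p => !(p.2.contains "joao"))).map (fun p => p.1))

-- ===== PRECONDITION & SPEC =====
-- Pre_ excludes exactly the rows missing a "food" or "name" key, on which Python A raises KeyError.
def Pre_joao_request (data : List (List (String × String))) : Prop :=
  (data.all (fun row => (PySem.Dict.mk row).contains "food" && (PySem.Dict.mk row).contains "name")) = true
instance (data : List (List (String × String))) : Decidable (Pre_joao_request data) := by unfold Pre_joao_request; infer_instance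

def pvWitness_joao_request : (List (List (String × String))) :=
  [[("food", "pizza"), ("name", "joao")], [("food", "rice"), ("name", "ana")]]

def Spec_joao_request (data : List (List (String × String))) (out : List String) : Prop := out = joao_request_alt data
instance (data : List (List (String × String))) (out : List String) : Decidable (Spec_joao_request data out) := by unfold Spec_joao_request; infer_instance

-- ===== CLAIM (what is proved, stated in full; the proofs are below) =====
def Claim_equal_joao_request : Prop := ∀ (data : List (List (String × String))), Dom_joao_request data → Pre_joao_request data → Spec_joao_request data (joao_request data)

-- ===== LEMMAS AND PROOFS =====

-- Set.contains through Set.add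
lemma pv_contains_add (s : PySem.Set String) (x y : String) :
    PySem.Set.contains (PySem.Set.add s x) y = (PySem.Set.contains s y || x == y) := by
  by_cases h : y ∈ PySem.Set.add s x
  · have h' := (PySem.Set.mem_add s x y).mp h
    rcases h' with h' | h'
    · simp [h']
    · simp [h']
  · have h1 : y ∉ s := fun hy => h ((PySem.Set.mem_add s x y).mpr (Or.inl hy))
    have h2 : ¬ y = x := fun hy => h ((PySem.Set.mem_add s x y).mpr (Or.inr hy))
    have h2' : ¬ x = y := fun hy => h2 hy.symm
    simp [h, h1, h2']

lemma pv_nodup_add (s : PySem.Set String) (x : String) (h : s.Nodup) :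
    (PySem.Set.add s x).Nodup := by
  unfold PySem.Set.add
  split
  · exact h
  · rename_i hc
    have hx : x ∉ s := fun hm => hc ((PySem.Set.contains_iff s x).mpr hm)
    simpa [List.nodup_append] using ⟨h, fun a ha hax => hx (hax ▸ ha)⟩

-- a filter on values that are determined by their keys is a filter on keys
lemma pv_filter_items (q : List String → Bool) (c : String → Bool) :
    ∀ (l : List (String × List String)), (∀ p ∈ l, q p.2 = c p.1) →
      (l.filter (fun p => q p.2)).map (fun p => p.1)
        = (l.map (fun p => p.1)).filter c
  | [], _ => rfl
  | (k, v) :: rest, h => by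
    have hv : q v = c k := h (k, v) (List.mem_cons_self)
    have ih := pv_filter_items q c rest (fun p hp => h p (List.mem_cons_of_mem _ hp))
    by_cases hc : c k = true
    · simp [hv, hc, ih]
    · simp [hv, Bool.eq_false_iff.mpr hc, ih]

-- the loop invariant: from any related pair of states, both loops end in related states
-- and the two post-processings agree
lemma pv_loop (data : List (List (String × String))) :
    ∀ (g j : PySem.Set String) (d : PySem.Dict String (List String)),
      d.keys = g → g.Nodup →
      (∀ k, (d.getD k []).contains "joao" = PySem.Set.contains j k) →
      (∀ x ∈ j, x ∈ g) →
      PySem.Set.diff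
        (data.foldl
          (fun (p : PySem.Set String × PySem.Set String) row =>
            (PySem.Set.add p.1 (pvRowGet row "food"),
             if pvRowGet row "name" == "joao" then PySem.Set.add p.2 (pvRowGet row "food") else p.2))
          (g, j)).1
        (data.foldl
          (fun (p : PySem.Set String × PySem.Set String) row =>
            (PySem.Set.add p.1 (pvRowGet row "food"),
             if pvRowGet row "name" == "joao" then PySem.Set.add p.2 (pvRowGet row "food") else p.2))
          (g, j)).2
      = PySem.Set.ofList
          (((data.foldl
              (fun (d : PySem.Dict String (List String)) row =>
                d.insert (pvRowGet row "food")
                  ((d.getD (pvRowGet row "food") []) ++ [pvRowGet row "name"]))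
              d).items.filter (fun p => !(p.2.contains "joao"))).map (fun p => p.1)) := by
  induction data with
  | nil =>
    intro g j d hk hnod hv hsub
    simp only [List.foldl_nil]
    have hkeys : d.keys.Nodup := hk ▸ hnod
    have hval : ∀ p ∈ d.items, (!(p.2.contains "joao")) = (!(PySem.Set.contains j p.1)) := by
      intro p hp
      have := PySem.Dict.getD_of_mem_items d (k := p.1) (v := p.2) hp hkeys []
      rw [← this, hv]
    have hfil := pv_filter_items (fun ns => !(ns.contains "joao"))
      (fun k => !(PySem.Set.contains j k)) d.items hval
    have hmap : d.items.map (fun p => p.1) = d.keys := rfl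
    rw [hfil, hmap, hk]
    have : (g.filter (fun k => !(PySem.Set.contains j k))).Nodup := hnod.filter _
    rw [PySem.Set.ofList_eq_self_of_nodup _ this]
    rfl
  | cons row rest ih =>
    intro g j d hk hnod hv hsub
    simp only [List.foldl_cons]
    set f := pvRowGet row "food" with hf
    set nm := pvRowGet row "name" with hnm
    set isj : Bool := (nm == "joao") with hisj
    -- new state for B
    set v : List String := (d.getD f []) ++ [nm] with hvdef
    have hk' : (d.insert f v).keys = PySem.Set.add g f := by
      by_cases h : f ∈ g
      · rw [PySem.Dict.keys_insert_of_contains d v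
          ((PySem.Dict.contains_iff_mem_keys d f).mpr (hk ▸ h)), hk]
        simp [PySem.Set.add, PySem.Set.contains, h]
      · have h1 : d.contains f = false := by
          cases hc : d.contains f with
          | false => rfl
          | true => exact absurd (hk ▸ (PySem.Dict.contains_iff_mem_keys d f).mp hc) h
        rw [PySem.Dict.keys_insert_of_not_contains d v h1, hk]
        simp [PySem.Set.add, PySem.Set.contains, h]
    have hnod' : (PySem.Set.add g f).Nodup := pv_nodup_add g f hnod
    have hbeq : (nm == "joao") = decide ("joao" = nm) := by
      rcases eq_or_ne nm "joao" with h | h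
      · simp [h]
      · simp [h, Ne.symm h]
    have hcontv : v.contains "joao" = ((d.getD f []).contains "joao" || isj) := by
      simp [hvdef, hisj, hbeq]
    have hv' : ∀ k, ((d.insert f v).getD k []).contains "joao"
        = PySem.Set.contains (if isj = true then PySem.Set.add j f else j) k := by
      intro k
      rw [PySem.Dict.getD_insert]
      by_cases hkf : k = f
      · subst hkf
        cases hji : isj with
        | true =>
          rw [if_pos (by simp), hcontv, hji, if_pos rfl, pv_contains_add]
          simp
        | false =>
          rw [if_pos (by simp), hcontv, hji, if_neg (by decide : ¬ (false = true)),
            Bool.or_false]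
          exact hv f
      · have hfk : (k == f) = false := by
          simp only [beq_eq_false_iff_ne, ne_eq]; exact hkf
        rw [if_neg (by simp [hkf])]
        cases hji : isj with
        | true =>
          have hfk2 : (f == k) = false := by
            simp only [beq_eq_false_iff_ne, ne_eq]; exact fun h => hkf h.symm
          rw [if_pos rfl, pv_contains_add, hfk2, Bool.or_false]
          exact hv k
        | false =>
          rw [if_neg (by decide : ¬ (false = true))]
          exact hv k
    have hsub' : ∀ x ∈ (if isj = true then PySem.Set.add j f else j), x ∈ PySem.Set.add g f := by
      intro x hx
      cases hji : isj with
      | true =>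
        rw [hji, if_pos rfl] at hx
        rcases (PySem.Set.mem_add j f x).mp hx with h | h
        · exact (PySem.Set.mem_add g f x).mpr (Or.inl (hsub x h))
        · exact (PySem.Set.mem_add g f x).mpr (Or.inr h)
      | false =>
        rw [hji, if_neg (by decide : ¬ (false = true))] at hx
        exact (PySem.Set.mem_add g f x).mpr (Or.inl (hsub x hx))
    have := ih (PySem.Set.add g f) (if isj = true then PySem.Set.add j f else j)
      (d.insert f v) hk' hnod' hv' hsub'
    cases hji : isj with
    | true => simpa [hji] using (by rw [hji] at this; simpa using this)
    | false => simpa [hji] using (by rw [hji] at this; simpa using this)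

-- ===== VERDICT (by name: the statement is the Claim_ definition above) =====
theorem joao_request_spec : Claim_equal_joao_request := by
  intro data _ _
  unfold Spec_joao_request joao_request joao_request_alt
  exact pv_loop data PySem.Set.empty PySem.Set.empty PySem.Dict.empty rfl List.nodup_nil
    (fun k => rfl) (fun x hx => absurd hx (List.not_mem_nil))
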